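-- pv_equiv track=rewrite | github.com/Deepadixit98/Problem-Solving | 4_2_encrypt.py | encrypt_sentence
-- ===== SOURCE A (Python) =====
-- vowels=['a','e','i','o','u']
--
-- def encrypt_sentence(sentence):
--     final=[]
--     list_sentence = sentence.split(" ")
--     for index,word in enumerate(list_sentence):
--         if (index+1)%2!=0:
--             final.append(word[::-1])
--         else:
--             v=[]#to store all vowels
--             t=[]#to store the letters temporily
--             for letter in word:
--                 if letter not in vowels:
--                     t.append(letter)
--                 else:
--                     v.append(letter)
--             t.extend(v)
--             final.append("".join(t))
--     #if len(final)>1: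
--     return " ".join(final)
-- ===== SOURCE B (Python) =====
-- vowels=['a','e','i','o','u']
--
-- def encrypt_sentence(sentence):
--     return " ".join(
--         "".join(reversed(w)) if i % 2 == 0
--         else "".join(sorted(w, key=lambda c: c in vowels))
--         for i, w in enumerate(sentence.split(" ")))
-- ===== Notes on version B (the rewrite author's own statement) =====
-- stated objective: idiomatic
-- what changed: Replaces the explicit accumulator loop and two-bucket consonant/vowel partition with a single generator expression that moves vowels to the end via one stable sort keyed on vowel membership.
import Mathlib
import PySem

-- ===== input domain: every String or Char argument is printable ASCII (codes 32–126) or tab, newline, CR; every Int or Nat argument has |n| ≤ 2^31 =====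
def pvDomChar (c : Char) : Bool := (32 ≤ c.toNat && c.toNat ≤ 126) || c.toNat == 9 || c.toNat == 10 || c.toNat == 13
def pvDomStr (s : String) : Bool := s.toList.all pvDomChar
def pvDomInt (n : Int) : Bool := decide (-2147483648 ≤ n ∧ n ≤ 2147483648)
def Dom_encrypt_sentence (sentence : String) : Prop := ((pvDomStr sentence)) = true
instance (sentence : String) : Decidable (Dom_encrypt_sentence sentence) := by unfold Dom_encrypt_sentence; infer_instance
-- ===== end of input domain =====

-- B replaces A's two-bucket accumulation by a single stable sort on vowel membership (idiomatic, same behaviour).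

-- ===== PORT A =====
def vowelsA : List Char := ['a','e','i','o','u']

def encrypt_sentence (sentence : String) : String :=
  let list_sentence := (PySem.Str.split? sentence " ").getD []   -- sep ≠ "" so split? is some
  let final := (PySem.List.enumerate list_sentence).foldl
    (fun final iw =>
      if PySem.Int.mod (iw.1 + 1) 2 ≠ 0 then
        final ++ [String.mk ((PySem.List.slice? iw.2.toList none none (-1)).getD [])]  -- word[::-1]
      else
        let tv := iw.2.toList.foldl
          (fun (tv : List Char × List Char) letter =>
            if letter ∉ vowelsA then (tv.1 ++ [letter], tv.2) else (tv.1, tv.2 ++ [letter]))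
          ([], [])
        final ++ [String.mk (tv.1 ++ tv.2)]) []
  PySem.Str.join " " final

-- ===== PORT B =====
def vowelsB : List Char := ['a','e','i','o','u']

def encrypt_sentence_alt (sentence : String) : String :=
  PySem.Str.join " "
    ((PySem.List.enumerate ((PySem.Str.split? sentence " ").getD [])).map
      (fun iw =>
        if PySem.Int.mod iw.1 2 = 0 then String.mk iw.2.toList.reverse
        else String.mk (PySem.List.sorted iw.2.toList (fun c => decide (c ∈ vowelsB)))))

-- ===== PRECONDITION & SPEC =====
def Spec_encrypt_sentence (sentence : String) (out : String) : Prop := out = encrypt_sentence_alt sentence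
instance (sentence : String) (out : String) : Decidable (Spec_encrypt_sentence sentence out) := by unfold Spec_encrypt_sentence; infer_instance

-- ===== CLAIM (what is proved, stated in full; the proofs are below) =====
def Claim_equal_encrypt_sentence : Prop := ∀ (sentence : String), Dom_encrypt_sentence sentence → Spec_encrypt_sentence sentence (encrypt_sentence sentence)

-- ===== LEMMAS AND PROOFS =====

-- foldl-append builds the same list as map
theorem foldl_append_eq_map {α β : Type} (f : α → β) (xs : List α) (acc : List β) :
    xs.foldl (fun acc x => acc ++ [f x]) acc = acc ++ xs.map f := by
  induction xs generalizing acc with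
  | nil => simp
  | cons x t ih => simp [List.foldl, ih]

-- word[::-1] is reverse
theorem slice_rev {α : Type} (xs : List α) :
    (PySem.List.slice? xs none none (-1)).getD [] = xs.reverse := by
  rw [PySem.List.slice?_none_none_neg_one]; rfl

-- A's two-bucket loop computes the two filters
theorem buckets_eq (cs t v : List Char) :
    cs.foldl
      (fun (tv : List Char × List Char) letter =>
        if letter ∉ vowelsA then (tv.1 ++ [letter], tv.2) else (tv.1, tv.2 ++ [letter]))
      (t, v)
    = (t ++ cs.filter (fun c => !decide (c ∈ vowelsA)), v ++ cs.filter (fun c => decide (c ∈ vowelsA))) := by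
  induction cs generalizing t v with
  | nil => simp
  | cons c cs ih =>
    rw [List.foldl_cons]
    by_cases h : c ∈ vowelsA
    · rw [if_neg (by simp [h]), ih]; simp [h]
    · rw [if_pos (by simp [h]), ih]; simp [h]

theorem insertBy_append_of_not_before {α : Type} (before : α → α → Bool) (x : α)
    (A B : List α) (hA : ∀ a ∈ A, before x a = false) :
    PySem.List.insertBy before x (A ++ B) = A ++ PySem.List.insertBy before x B := by
  induction A with
  | nil => simp
  | cons a A ih =>
    have ha := hA a (by simp)
    simp only [List.cons_append, PySem.List.insertBy, ha]
    simp only [Bool.false_eq_true, if_false]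
    exact congrArg (a :: ·) (ih (fun a h => hA a (by simp [h])))

-- stable sort by a Bool key = false-keyed elements then true-keyed elements, each in order
theorem sorted_bool_eq_filters {α : Type} (key : α → Bool) (xs : List α) :
    PySem.List.sorted xs key = xs.filter (fun c => !key c) ++ xs.filter key := by
  rw [PySem.List.sorted_eq_foldl_insertBy]
  induction xs using List.reverseRecOn with
  | nil => simp
  | append_singleton ys x ih =>
    rw [List.foldl_append, List.foldl_cons, List.foldl_nil, ih]
    by_cases hx : key x = true
    · have h1 : ∀ a ∈ ys.filter (fun c => !key c) ++ ys.filter key,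
          (decide (key x < key a)) = false := by
        intro a _; simp [hx]
      have : PySem.List.insertBy (fun a b => decide (key a < key b)) x
          ((ys.filter (fun c => !key c) ++ ys.filter key) ++ []) =
          (ys.filter (fun c => !key c) ++ ys.filter key) ++ PySem.List.insertBy
            (fun a b => decide (key a < key b)) x [] :=
        insertBy_append_of_not_before _ _ _ _ (by intro a ha; exact h1 a (by simpa using ha))
      simp only [List.append_nil] at this
      rw [this]
      simp [PySem.List.insertBy, hx, List.filter_append]
    · have hx' : key x = false := by simpa using hx
      rw [insertBy_append_of_not_before _ _ _ _
        (by intro a ha; simp at ha; simp [hx', ha.2])]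
      cases hB : ys.filter key with
      | nil => simp [PySem.List.insertBy, List.filter_append, hx', hB]
      | cons b bs =>
        have hb : key b = true := by
          have := List.of_mem_filter (a := b) (l := ys) (p := key) (by rw [hB]; simp)
          simpa using this
        simp [PySem.List.insertBy, hx', hb, List.filter_append, hB]

-- A's per-word transform, factored out of the fold
def wordA (iw : Int × String) : String :=
  if PySem.Int.mod (iw.1 + 1) 2 ≠ 0 then
    String.mk ((PySem.List.slice? iw.2.toList none none (-1)).getD [])
  else
    let tv := iw.2.toList.foldl
      (fun (tv : List Char × List Char) letter =>
        if letter ∉ vowelsA then (tv.1 ++ [letter], tv.2) else (tv.1, tv.2 ++ [letter]))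
      ([], [])
    String.mk (tv.1 ++ tv.2)

-- A's per-word transform equals B's per-word transform
theorem word_eq (iw : Int × String) :
    wordA iw
    = (if PySem.Int.mod iw.1 2 = 0 then String.mk iw.2.toList.reverse
       else String.mk (PySem.List.sorted iw.2.toList (fun c => decide (c ∈ vowelsB)))) := by
  obtain ⟨i, w⟩ := iw
  unfold wordA
  have hpar : (PySem.Int.mod (i + 1) 2 ≠ 0) ↔ (PySem.Int.mod i 2 = 0) := by
    simp only [PySem.Int.mod, Int.fmod_eq_emod]
    omega
  by_cases h : PySem.Int.mod i 2 = 0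
  · rw [if_pos (hpar.mpr h), if_pos h, slice_rev]
  · rw [if_neg (fun hc => h (hpar.mp hc)), if_neg h]
    simp only [buckets_eq, sorted_bool_eq_filters (fun c => decide (c ∈ vowelsB)) w.toList]
    simp [vowelsA, vowelsB]

-- ===== VERDICT (by name: the statement is the Claim_ definition above) =====
theorem encrypt_sentence_spec : Claim_equal_encrypt_sentence := by
  intro sentence _
  unfold Spec_encrypt_sentence encrypt_sentence encrypt_sentence_alt
  simp only []
  rw [show (fun (final : List String) (iw : Int × String) =>
      if PySem.Int.mod (iw.1 + 1) 2 ≠ 0 then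
        final ++ [String.mk ((PySem.List.slice? iw.2.toList none none (-1)).getD [])]
      else
        let tv := iw.2.toList.foldl
          (fun (tv : List Char × List Char) letter =>
            if letter ∉ vowelsA then (tv.1 ++ [letter], tv.2) else (tv.1, tv.2 ++ [letter]))
          ([], [])
        final ++ [String.mk (tv.1 ++ tv.2)])
    = (fun final iw => final ++ [wordA iw]) from
      funext fun final => funext fun iw => by unfold wordA; split_ifs <;> rfl]
  rw [foldl_append_eq_map]
  simp only [List.nil_append]
  congr 1
  exact List.map_congr_left (fun iw _ => word_eq iw)
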